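-- pv_equiv track=rewrite | github.com/Gauravkumar2701/LinuxWcCliTool | cli.py | getTheNumberOfChars
-- ===== SOURCE A (Python) =====
-- def getTheNumberOfChars(file):
--     count = 0
--
--     for line in file:
--         numberOfWords = line.split(" ")
--
--         for word in numberOfWords:
--
--             if word != " ":
--                 for char in word:
--                     if char != " ":
--                         count += 1
--
--     return count
-- ===== SOURCE B (Python) =====
-- def getTheNumberOfChars(file):
--     return sum(len(line) - line.count(" ") for line in file)
-- ===== Notes on version B (the rewrite author's own statement) =====
-- stated objective: simpler
-- what changed: Replaces the vacuous split/word/char nested loops with a one-line sum of len(line) - line.count(' ') per line (aggregate arithmetic instead of per-character counting).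
import Mathlib
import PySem

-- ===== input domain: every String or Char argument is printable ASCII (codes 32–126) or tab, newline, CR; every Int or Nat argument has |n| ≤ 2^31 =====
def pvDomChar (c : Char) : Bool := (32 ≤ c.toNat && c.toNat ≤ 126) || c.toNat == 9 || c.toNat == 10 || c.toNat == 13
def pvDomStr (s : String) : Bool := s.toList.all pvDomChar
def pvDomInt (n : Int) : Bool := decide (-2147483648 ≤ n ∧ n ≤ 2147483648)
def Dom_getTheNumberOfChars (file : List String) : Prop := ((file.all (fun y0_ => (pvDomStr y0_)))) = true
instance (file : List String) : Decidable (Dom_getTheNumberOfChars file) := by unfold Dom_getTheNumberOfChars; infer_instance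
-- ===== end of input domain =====

-- B replaces A's vacuous split/word/char nested counting loops with one sum of
-- len(line) - line.count(" ") per line (objective: simpler).

-- ===== PORT A =====
def getTheNumberOfChars (file : List String) : Int :=
  file.foldl (fun count line =>
    match PySem.Str.split? line " " with
    | none => count  -- unreachable: the separator " " is nonempty
    | some numberOfWords =>
      numberOfWords.foldl (fun count word =>
        if word ≠ " " then
          word.toList.foldl (fun count char =>
            if char ≠ ' ' then count + 1 else count) count
        else count) count) 0

-- ===== PORT B =====
def getTheNumberOfChars_alt (file : List String) : Int :=
  (file.map (fun line => PySem.Str.len line - (PySem.Str.count line " " : Int))).sum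

-- ===== PRECONDITION & SPEC =====
def Spec_getTheNumberOfChars (file : List String) (out : Int) : Prop := out = getTheNumberOfChars_alt file
instance (file : List String) (out : Int) : Decidable (Spec_getTheNumberOfChars file out) := by unfold Spec_getTheNumberOfChars; infer_instance

-- ===== CLAIM (what is proved, stated in full; the proofs are below) =====
def Claim_equal_getTheNumberOfChars : Prop := ∀ (file : List String), Dom_getTheNumberOfChars file → Spec_getTheNumberOfChars file (getTheNumberOfChars file)

-- ===== LEMMAS AND PROOFS =====

-- Chars.count with a single-character needle is List.count.
theorem pv_count_go (c : Char) : ∀ (fuel : Nat) (l : List Char) (acc : Nat),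
    l.length ≤ fuel → PySem.Chars.count.go [c] fuel l acc = acc + l.count c := by
  intro fuel
  induction fuel with
  | zero =>
    intro l acc h
    have : l = [] := List.length_eq_zero_iff.mp (Nat.le_zero.mp h)
    subst this; simp [PySem.Chars.count.go]
  | succ n ih =>
    intro l acc h
    cases l with
    | nil => simp [PySem.Chars.count.go]
    | cons hd t =>
      simp only [List.length_cons] at h
      rw [PySem.Chars.count.go]
      by_cases hc : hd = c
      · subst hc
        rw [if_pos (by simp [List.isPrefixOf])]
        have hdrop : List.drop ([hd] : List Char).length (hd :: t) = t := by simp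
        rw [hdrop, ih t (acc + 1) (by omega)]
        simp
        omega
      · rw [if_neg (by simp [List.isPrefixOf]; exact fun hh => hc hh.symm)]
        rw [ih t acc (by omega)]
        simp [hc]

theorem pv_chars_count_single (c : Char) (l : List Char) :
    PySem.Chars.count l [c] = l.count c := by
  simp [PySem.Chars.count, pv_count_go c l.length l 0 le_rfl]

-- splitOn.go on separator [' ']: all pieces are space-free and their lengths sum
-- to the number of non-space characters of the remaining input plus what is pending.
theorem pv_go_pieces : ∀ (fuel : Nat) (l cur : List Char) (acc : List (List Char)),
    l.length + 1 ≤ fuel → (' ' ∉ cur) → (∀ w ∈ acc, ' ' ∉ w) →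
    (∀ w ∈ PySem.Chars.splitOn.go [' '] fuel l cur acc, ' ' ∉ w) ∧
    ((PySem.Chars.splitOn.go [' '] fuel l cur acc).map List.length).sum
      = l.countP (fun ch => !(ch == ' ')) + cur.length + (acc.map List.length).sum := by
  intro fuel
  induction fuel with
  | zero => intro l cur acc h _ _; omega
  | succ n ih =>
    intro l cur acc h hcur hacc
    cases l with
    | nil =>
      rw [PySem.Chars.splitOn.go]
      · constructor
        · intro w hw
          simp only [List.mem_reverse, List.mem_cons] at hw
          rcases hw with rfl | hw
          · simp only [List.mem_reverse]; exact hcur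
          · exact hacc w hw
        · simp only [List.map_reverse, List.sum_reverse, List.map_cons, List.sum_cons,
            List.countP_nil, List.length_reverse]
          omega
      all_goals (intros; omega)
    | cons hd t =>
      rw [PySem.Chars.splitOn.go]
      · by_cases hsp : hd = ' '
        · subst hsp
          have hpre : List.isPrefixOf [' '] (' ' :: t) = true := by
            simp [List.isPrefixOf]
          rw [if_pos hpre]
          simp only [List.length_cons, List.drop_succ_cons, List.length_nil, List.drop_zero]
          have hih := ih t [] (cur.reverse :: acc) (by simp only [List.length_cons] at h; omega)
            (by simp)
            (by intro w hw
                rcases List.mem_cons.mp hw with rfl | hw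
                · simp only [List.mem_reverse]; exact hcur
                · exact hacc w hw)
          refine ⟨hih.1, ?_⟩
          rw [hih.2]
          simp only [List.countP_cons, List.map_cons, List.sum_cons, List.length_nil,
            List.length_reverse]
          simp
          omega
        · have hpre : List.isPrefixOf [' '] (hd :: t) = false := by
            simp [List.isPrefixOf]
            exact fun hh => absurd hh.symm hsp
          rw [if_neg (by simp [hpre])]
          have hih := ih t (hd :: cur) acc (by simp only [List.length_cons] at h ⊢; omega)
            (by intro hmem
                rcases List.mem_cons.mp hmem with hh | hh
                · exact hsp hh.symm
                · exact hcur hh)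
            hacc
          refine ⟨hih.1, ?_⟩
          rw [hih.2]
          simp [hsp]
          omega

-- the per-line value computed by A's two inner loops
theorem pv_line (s : String) :
    ∀ (c : Int),
    (match PySem.Str.split? s " " with
     | none => c
     | some numberOfWords =>
       numberOfWords.foldl (fun count word =>
         if word ≠ " " then
           word.toList.foldl (fun count char =>
             if char ≠ ' ' then count + 1 else count) count
         else count) c)
    = c + (PySem.Str.len s - (PySem.Str.count s " " : Int)) := by
  intro c
  have hsep : (" " : String).toList = [' '] := rfl
  have hsplit : PySem.Str.split? s " " =
      some ((PySem.Chars.splitOn s.toList [' ']).map String.ofList) := by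
    simp [PySem.Str.split?, PySem.Chars.split?, hsep]
  rw [hsplit]
  simp only [List.foldl_map]
  have hgo := pv_go_pieces (s.toList.length + 1) s.toList [] [] le_rfl (by simp) (by simp)
  have hfree : ∀ w ∈ PySem.Chars.splitOn s.toList [' '], ' ' ∉ w := by
    simpa [PySem.Chars.splitOn] using hgo.1
  have hsum : ((PySem.Chars.splitOn s.toList [' ']).map List.length).sum
      = s.toList.countP (fun ch => !(ch == ' ')) := by
    simpa [PySem.Chars.splitOn] using hgo.2
  have hstep : ∀ (a : Int) (w : List Char), w ∈ PySem.Chars.splitOn s.toList [' '] →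
      (fun count w =>
        if String.ofList w ≠ " " then
          (String.ofList w).toList.foldl (fun count char =>
            if char ≠ ' ' then count + 1 else count) count
        else count) a w
      = (fun count (w : List Char) => count + (w.length : Int)) a w := by
    intro a w hw
    have hf := hfree w hw
    have hne : String.ofList w ≠ " " := by
      intro hEq
      have : w = [' '] := by
        have := congrArg String.toList hEq
        simpa using this
      exact hf (by simp [this])
    simp only [if_pos hne, String.toList_ofList]
    rw [PySem.List.foldl_ite_add_one]
    congr 1
    have : w.countP (fun ch => decide ¬ch = ' ') = w.length :=
      List.countP_eq_length.mpr (by intro ch hch; simp; intro hh; exact hf (hh ▸ hch))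
    rw [this]
  rw [PySem.List.foldl_congr_mem _ _ _ _ hstep, PySem.List.foldl_add]
  have hcast : ∀ (P : List (List Char)),
      (P.map (fun w => ((w.length : Nat) : Int))).sum = ((P.map List.length).sum : Int) := by
    intro P; induction P with
    | nil => simp
    | cons x xs ihp => simp [ihp]
  rw [hcast, hsum]
  have hlen : PySem.Str.len s = ((s.toList.length : Nat) : Int) := by simp
  have hcnt : (PySem.Str.count s " " : Int) = ((s.toList.count ' ' : Nat) : Int) := by
    simp [PySem.Str.count_eq, hsep, pv_chars_count_single]
  rw [hlen, hcnt]
  have h2 : s.toList.length = s.toList.count ' ' + s.toList.countP (fun ch => !(ch == ' ')) := by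
    simpa [List.count] using List.length_eq_countP_add_countP (l := s.toList) (p := fun ch => ch == ' ')
  omega

-- ===== VERDICT (by name: the statement is the Claim_ definition above) =====
theorem getTheNumberOfChars_spec : Claim_equal_getTheNumberOfChars := by
  intro file _
  unfold Spec_getTheNumberOfChars getTheNumberOfChars getTheNumberOfChars_alt
  rw [PySem.List.foldl_congr_mem _ _
    (fun (c : Int) line => c + (PySem.Str.len line - (PySem.Str.count line " " : Int))) _
    (fun a line _ => pv_line line a)]
  rw [PySem.List.foldl_add]
  simp
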